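-- pv_equiv track=rewrite | github.com/ryankenney-dev/advent-of-code-2021 | day3/day3_part1.py | compute_generic_rate
-- ===== SOURCE A (Python) =====
-- from typing import List, NewType, TypedDict, Tuple
--
-- def compute_generic_rate(numbers: List[str], comparison_multiplier: int):
--     gamma_rate_binary: List[str] = []
--     for i in range(0, len(numbers[0])):
--         count_0: int = 0
--         count_1: int = 0
--         for number in numbers:
--             if number[i] == '0':
--                 count_0 += 1
--             else:
--                 count_1 += 1
--         if count_0*comparison_multiplier > count_1*comparison_multiplier:
--             gamma_rate_binary.append('0')
--         else:
--             gamma_rate_binary.append('1')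
--     return int(''.join(gamma_rate_binary), 2)
-- ===== SOURCE B (Python) =====
-- def compute_generic_rate(numbers, comparison_multiplier):
--     width = len(numbers[0])
--     counts = [0] * width
--     for number in numbers:
--         counts = [counts[i] + (1 if number[i] == '0' else 0) for i in range(width)]
--     total = len(numbers)
--     bits = ['0' if c0 * comparison_multiplier > (total - c0) * comparison_multiplier else '1'
--             for c0 in counts]
--     return int(''.join(bits), 2)
-- ===== Notes on version B (the rewrite author's own statement) =====
-- stated objective: alternative
-- what changed: B makes one row-wise pass building a per-column '0'-tally table and then a separate decision pass over the columns, instead of A's column-major nested loops that rescan all numbers per column counting both bit kinds.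
import Mathlib
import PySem

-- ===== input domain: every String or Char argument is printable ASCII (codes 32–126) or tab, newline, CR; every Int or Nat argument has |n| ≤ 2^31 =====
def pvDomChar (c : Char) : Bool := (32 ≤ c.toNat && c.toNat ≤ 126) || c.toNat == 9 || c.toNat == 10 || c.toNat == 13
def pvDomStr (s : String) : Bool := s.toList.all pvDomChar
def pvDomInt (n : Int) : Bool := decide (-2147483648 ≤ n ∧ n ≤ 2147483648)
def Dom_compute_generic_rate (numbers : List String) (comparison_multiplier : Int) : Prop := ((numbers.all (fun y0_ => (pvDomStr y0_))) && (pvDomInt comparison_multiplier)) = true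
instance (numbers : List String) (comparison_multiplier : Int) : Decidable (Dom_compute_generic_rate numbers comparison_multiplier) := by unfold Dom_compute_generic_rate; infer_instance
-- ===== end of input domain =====

-- B replaces A's column-major nested recount of both bit kinds by one row-wise pass
-- building a per-column '0'-tally table plus a separate decision pass (objective: alternative decomposition).

-- ===== PORT A =====
-- literal port of A: for each column i, re-scan all numbers counting '0' vs non-'0',
-- append '0'/'1'; finally int(''.join(...), 2) via PySem.Int.ofCharsBase?.
def compute_generic_rate (numbers : List String) (comparison_multiplier : Int) : Int :=
  let first := ((PySem.List.pyGet? numbers 0).getD "").toList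
  let gamma : List Char :=
    (PySem.List.pyRange 0 (first.length : Int) 1).foldl (fun g i =>
      let c := numbers.foldl
        (fun (c : Int × Int) number =>
          if PySem.List.pyGet? number.toList i = some '0' then (c.1 + 1, c.2) else (c.1, c.2 + 1))
        (0, 0)
      g ++ [if c.1 * comparison_multiplier > c.2 * comparison_multiplier then '0' else '1']) []
  (PySem.Int.ofCharsBase? gamma 2).getD 0

-- ===== PORT B =====
-- one comprehension step of Source B: counts = [counts[i] + (1 if number[i]=='0' else 0) for i in range(width)]
def cgrColInc (number : List Char) (width : Int) (counts : List Int) : List Int :=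
  (PySem.List.pyRange 0 width 1).map (fun i =>
    PySem.List.pyGetD counts i 0 +
      (if PySem.List.pyGet? number i = some '0' then 1 else 0))

def compute_generic_rate_alt (numbers : List String) (comparison_multiplier : Int) : Int :=
  let width := ((PySem.List.pyGet? numbers 0).getD "").toList.length
  let counts := numbers.foldl (fun cs number => cgrColInc number.toList (width : Int) cs)
    (List.replicate width 0)
  let total : Int := numbers.length
  let bits := counts.map (fun c0 =>
    if c0 * comparison_multiplier > (total - c0) * comparison_multiplier then '0' else '1')
  (PySem.Int.ofCharsBase? bits 2).getD 0

-- ===== PRECONDITION & SPEC =====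
-- Pre_ excludes exactly the inputs where the Python A raises: empty list (IndexError on
-- numbers[0]), empty first string (ValueError from int('', 2)), or a member shorter than
-- numbers[0] (IndexError on number[i]); B raises on the same inputs.
def Pre_compute_generic_rate (numbers : List String) (comparison_multiplier : Int) : Prop :=
  numbers ≠ [] ∧ 0 < (numbers.headD "").toList.length ∧
    ∀ s ∈ numbers, (numbers.headD "").toList.length ≤ s.toList.length
instance (numbers : List String) (comparison_multiplier : Int) : Decidable (Pre_compute_generic_rate numbers comparison_multiplier) := by unfold Pre_compute_generic_rate; infer_instance
def pvWitness_compute_generic_rate : List String × Int := (["10", "01", "11"], 1)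

def Spec_compute_generic_rate (numbers : List String) (comparison_multiplier : Int) (out : Int) : Prop := out = compute_generic_rate_alt numbers comparison_multiplier
instance (numbers : List String) (comparison_multiplier : Int) (out : Int) : Decidable (Spec_compute_generic_rate numbers comparison_multiplier out) := by unfold Spec_compute_generic_rate; infer_instance

-- ===== CLAIM (what is proved, stated in full; the proofs are below) =====
def Claim_equal_compute_generic_rate : Prop := ∀ (numbers : List String) (comparison_multiplier : Int), Dom_compute_generic_rate numbers comparison_multiplier → Pre_compute_generic_rate numbers comparison_multiplier → Spec_compute_generic_rate numbers comparison_multiplier (compute_generic_rate numbers comparison_multiplier)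

-- ===== LEMMAS AND PROOFS =====

-- number of strings whose char at column i is '0' / is not '0'
def cgrCnt : List String → Int → Int
  | [], _ => 0
  | n :: ns, i => (if PySem.List.pyGet? n.toList i = some '0' then 1 else 0) + cgrCnt ns i

def cgrOth : List String → Int → Int
  | [], _ => 0
  | n :: ns, i => (if PySem.List.pyGet? n.toList i = some '0' then 0 else 1) + cgrOth ns i

lemma cgrCnt_add_oth (ns : List String) (i : Int) :
    cgrCnt ns i + cgrOth ns i = (ns.length : Int) := by
  induction ns with
  | nil => simp [cgrCnt, cgrOth]
  | cons n ns ih =>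
    simp only [cgrCnt, cgrOth, List.length_cons]
    split <;> push_cast <;> omega

-- A's inner loop computes the pair of tallies
lemma cgrPairFold (i : Int) (ns : List String) : ∀ (a b : Int),
    ns.foldl (fun (c : Int × Int) number =>
        if PySem.List.pyGet? number.toList i = some '0' then (c.1 + 1, c.2) else (c.1, c.2 + 1))
      (a, b) = (a + cgrCnt ns i, b + cgrOth ns i) := by
  induction ns with
  | nil => intro a b; simp [cgrCnt, cgrOth]
  | cons n ns ih =>
    intro a b
    simp only [List.foldl_cons, cgrCnt, cgrOth]
    split <;> rw [ih] <;> simp <;> ring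

-- B's tally table stays a map over the column range
lemma cgrCounts_fold (W : Int) (ns : List String) : ∀ (f : Int → Int),
    ns.foldl (fun cs number => cgrColInc number.toList W cs)
        ((PySem.List.pyRange 0 W 1).map f)
      = (PySem.List.pyRange 0 W 1).map (fun j => f j + cgrCnt ns j) := by
  induction ns with
  | nil =>
    intro f
    exact (List.map_congr_left (fun j _ => by simp [cgrCnt])).symm
  | cons n ns ih =>
    intro f
    simp only [List.foldl_cons]
    have hstep : cgrColInc n.toList W ((PySem.List.pyRange 0 W 1).map f)
        = (PySem.List.pyRange 0 W 1).map
            (fun i => f i + (if PySem.List.pyGet? n.toList i = some '0' then 1 else 0)) := by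
      unfold cgrColInc
      refine List.map_congr_left (fun i hi => ?_)
      have hmem := (PySem.List.mem_pyRange_one).mp hi
      rw [PySem.List.pyGetD_map_pyRange_of_nonneg f W i 0 hmem.1 hmem.2]
    rw [hstep, ih]
    refine List.map_congr_left (fun j _ => ?_)
    simp only [cgrCnt]
    ring

-- ===== VERDICT (by name: the statement is the Claim_ definition above) =====
theorem compute_generic_rate_spec : Claim_equal_compute_generic_rate := by
  intro numbers m _ _
  show compute_generic_rate numbers m = compute_generic_rate_alt numbers m
  simp only [compute_generic_rate, compute_generic_rate_alt]
  apply congrArg (fun l => (PySem.Int.ofCharsBase? l 2).getD 0)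
  have hrep : (List.replicate ((PySem.List.pyGet? numbers 0).getD "").toList.length (0 : Int))
      = (PySem.List.pyRange 0 (((PySem.List.pyGet? numbers 0).getD "").toList.length : Int) 1).map
          (fun _ => 0) := by
    rw [List.map_const', PySem.List.length_pyRange_one]
    simp
  rw [hrep, cgrCounts_fold, List.map_map, PySem.List.foldl_append_singleton_eq_map]
  refine List.map_congr_left (fun i _ => ?_)
  rw [cgrPairFold]
  have h := cgrCnt_add_oth numbers i
  simp only [Function.comp, zero_add]
  have h2 : cgrOth numbers i = (numbers.length : Int) - cgrCnt numbers i := by omega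
  rw [h2]
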